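-- pv_equiv track=rewrite | github.com/jaewon0317/coding_test | 프로그래머스/1/133502. 햄버거 만들기/햄버거 만들기.py | solution
-- ===== SOURCE A (Python) =====
-- def solution(ingredient):
--     answer = 0
--     temp = []
--     for i in ingredient:
--         temp.append(i)
--         if temp[-4:] == [1,2,3,1]:
--             del temp[-4:]
--             answer += 1
--     return answer
-- ===== SOURCE B (Python) =====
-- def solution(ingredient):
--     items = list(ingredient)
--     count = 0
--     while True:
--         found = False
--         for i in range(len(items) - 3):
--             if items[i:i+4] == [1, 2, 3, 1]:
--                 del items[i:i+4]
--                 count += 1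
--                 found = True
--                 break
--         if not found:
--             return count
-- ===== Notes on version B (the rewrite author's own statement) =====
-- stated objective: alternative
-- what changed: Replaces the single-pass stack (append each item, check the last four, pop and count) by repeated left-to-right rescans that delete the leftmost contiguous burger run and restart from the front until no run remains; the count is equal because the removal rewrite system is confluent.
import Mathlib
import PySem

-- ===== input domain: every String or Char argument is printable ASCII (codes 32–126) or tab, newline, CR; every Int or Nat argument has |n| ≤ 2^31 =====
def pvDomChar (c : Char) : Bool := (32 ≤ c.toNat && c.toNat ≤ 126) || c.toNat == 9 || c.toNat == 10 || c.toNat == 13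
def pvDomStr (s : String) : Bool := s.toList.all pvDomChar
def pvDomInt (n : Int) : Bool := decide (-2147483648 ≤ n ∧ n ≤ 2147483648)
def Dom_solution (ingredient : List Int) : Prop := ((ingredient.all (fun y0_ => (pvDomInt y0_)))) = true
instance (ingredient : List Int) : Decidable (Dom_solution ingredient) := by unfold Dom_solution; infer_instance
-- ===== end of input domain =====

-- B replaces A's single-pass stack by repeated full rescans that delete the leftmost [1,2,3,1] run
-- and restart; an alternative decomposition (not faster), return values proved equal.

-- ===== PORT A =====
-- loop body of A: append i, pop and count if the last four elements are [1,2,3,1]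
def stepA (st : Int × List Int) (i : Int) : Int × List Int :=
  let temp := st.2 ++ [i]
  if PySem.List.slice temp (some (-4)) none = [1, 2, 3, 1] then
    (st.1 + 1, PySem.List.slice temp none (some (-4)))
  else
    (st.1, temp)

def solution (ingredient : List Int) : Int :=
  (ingredient.foldl stepA (0, [])).1

-- ===== PORT B =====
-- Source B's inner for-loop: index of the first i with items[i:i+4] == [1,2,3,1], scanning left to right
def findPat : List Int → Option Nat
  | [] => none
  | x :: rest =>
    if (x :: rest).take 4 = [1, 2, 3, 1] then some 0 else (findPat rest).map (· + 1)

-- termination helper for the while-loop: a found run lies inside the list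
lemma findPat_bound : ∀ (l : List Int) (i : Nat), findPat l = some i → i + 4 ≤ l.length := by
  intro l
  induction l with
  | nil => intro i h; simp [findPat] at h
  | cons x rest ih =>
    intro i h
    unfold findPat at h
    split at h
    · rename_i hp
      have hl := congrArg List.length hp
      simp [List.length_take] at hl
      cases h
      simp
      omega
    · rcases Option.map_eq_some_iff.mp h with ⟨j, hj, hji⟩
      have := ih j hj
      simp
      omega

-- Source B's while-loop: delete the run found, count it, restart the scan
def solutionAltGo (l : List Int) : Int :=
  match h : findPat l with
  | none => 0
  | some i => 1 + solutionAltGo (l.take i ++ l.drop (i + 4))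
termination_by l.length
decreasing_by
  have := findPat_bound l i h
  simp [List.length_append, List.length_take, List.length_drop]
  omega

def solution_alt (ingredient : List Int) : Int := solutionAltGo ingredient

-- ===== PRECONDITION & SPEC =====
def Spec_solution (ingredient : List Int) (out : Int) : Prop := out = solution_alt ingredient
instance (ingredient : List Int) (out : Int) : Decidable (Spec_solution ingredient out) := by unfold Spec_solution; infer_instance

-- ===== CLAIM (what is proved, stated in full; the proofs are below) =====
def Claim_equal_solution : Prop := ∀ (ingredient : List Int), Dom_solution ingredient → Spec_solution ingredient (solution ingredient)

-- ===== LEMMAS AND PROOFS =====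

-- A's pythonic slices written as drop/take
lemma stepA_eq (st : Int × List Int) (i : Int) :
    stepA st i =
      if (st.2 ++ [i]).drop ((st.2 ++ [i]).length - 4) = [1, 2, 3, 1] then
        (st.1 + 1, (st.2 ++ [i]).take ((st.2 ++ [i]).length - 4))
      else (st.1, st.2 ++ [i]) := by
  simp only [stepA, PySem.List.slice_from_neg_ofNat _ 4 (by omega),
    PySem.List.slice_to_neg_ofNat _ 4 (by omega)]

lemma go_none (l : List Int) (h : findPat l = none) : solutionAltGo l = 0 := by
  rw [solutionAltGo]
  split <;> simp_all

lemma go_some (l : List Int) (i : Nat) (h : findPat l = some i) :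
    solutionAltGo l = 1 + solutionAltGo (l.take i ++ l.drop (i + 4)) := by
  rw [solutionAltGo]
  split <;> simp_all

lemma findPat_none_of (l : List Int) (h : ∀ j, (l.drop j).take 4 ≠ [1, 2, 3, 1]) :
    findPat l = none := by
  induction l with
  | nil => rfl
  | cons x rest ih =>
    unfold findPat
    rw [if_neg (by simpa using h 0)]
    rw [ih (fun j => by simpa using h (j + 1))]
    rfl

lemma findPat_eq_some (l : List Int) (i : Nat)
    (h1 : ∀ j < i, (l.drop j).take 4 ≠ [1, 2, 3, 1])
    (h2 : (l.drop i).take 4 = [1, 2, 3, 1]) : findPat l = some i := by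
  induction l generalizing i with
  | nil => simp at h2
  | cons x rest ih =>
    cases i with
    | zero =>
      unfold findPat
      rw [if_pos (by simpa using h2)]
    | succ j =>
      unfold findPat
      rw [if_neg (by simpa using h1 0 (Nat.succ_pos j))]
      rw [ih j (fun k hk => by simpa using h1 (k + 1) (by omega)) (by simpa using h2)]
      rfl

lemma ne_pat_of_len_lt {l : List Int} (h : l.length < 4) : l ≠ [1, 2, 3, 1] := by
  intro he
  have := congrArg List.length he
  simp at this
  omega

lemma main_lemma (rest : List Int) : ∀ (temp : List Int) (a : Int),
    (∀ j, (temp.drop j).take 4 ≠ [1, 2, 3, 1]) →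
    (rest.foldl stepA (a, temp)).1 = a + solutionAltGo (temp ++ rest) := by
  induction rest with
  | nil =>
    intro temp a h
    simp [go_none temp (findPat_none_of temp h)]
  | cons x rest ih =>
    intro temp a h
    rw [List.foldl_cons, stepA_eq]
    set t := temp ++ [x] with ht
    have htl : t.length = temp.length + 1 := by simp [ht]
    set m := temp.length with hm
    by_cases hc : t.drop (t.length - 4) = [1, 2, 3, 1]
    · have hlen4 : 4 ≤ t.length := by
        by_contra hn
        exact ne_pat_of_len_lt (by simp [List.length_drop]; omega) hc
      have hm3 : 3 ≤ m := by omega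
      have htm : t.length - 4 = m - 3 := by omega
      -- sub-4-window facts
      have hwin : ∀ j, j < m - 3 → ((t ++ rest).drop j).take 4 = (temp.drop j).take 4 := by
        intro j hj
        rw [List.drop_append_of_le_length (by omega), ht,
            List.drop_append_of_le_length (by omega),
            List.append_assoc,
            List.take_append_of_le_length (by simp [List.length_drop]; omega)]
      have hfind : findPat (t ++ rest) = some (m - 3) := by
        apply findPat_eq_some
        · intro j hj
          rw [hwin j hj]; exact h j
        · rw [List.drop_append_of_le_length (by omega),
              List.take_append_of_le_length (by simp [List.length_drop]; omega),
              List.take_of_length_le (by simp [List.length_drop]; omega)]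
          rw [htm] at hc
          exact hc
      have hrem : (t ++ rest).take (m - 3) ++ (t ++ rest).drop (m - 3 + 4) = temp.take (m - 3) ++ rest := by
        have h1 : (t ++ rest).take (m - 3) = temp.take (m - 3) := by
          rw [List.take_append_of_le_length (by omega), ht,
              List.take_append_of_le_length (by omega)]
        have h2 : (t ++ rest).drop (m - 3 + 4) = rest := by
          have : m - 3 + 4 = t.length := by omega
          rw [this, List.drop_append_of_le_length (le_refl _), List.drop_length, List.nil_append]
        rw [h1, h2]
      have hstack : t.take (t.length - 4) = temp.take (m - 3) := by
        rw [htm, ht, List.take_append_of_le_length (by omega)]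
      have hinv : ∀ j, ((temp.take (m - 3)).drop j).take 4 ≠ [1, 2, 3, 1] := by
        intro j
        rw [List.drop_take, List.take_take]
        by_cases h4 : 4 ≤ m - 3 - j
        · rw [min_eq_left h4]; exact h j
        · exact ne_pat_of_len_lt (by simp [List.length_take, List.length_drop]; omega)
      rw [if_pos hc, hstack]
      rw [ih (temp.take (m - 3)) (a + 1) hinv]
      have hrhs : temp ++ x :: rest = t ++ rest := by simp [ht]
      rw [hrhs, go_some _ _ hfind, hrem]
      ring
    · rw [if_neg hc]
      have hinv : ∀ j, (t.drop j).take 4 ≠ [1, 2, 3, 1] := by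
        intro j he
        have hl := congrArg List.length he
        simp [List.length_take, List.length_drop] at hl
        have hj3 : j + 4 ≤ t.length := by omega
        by_cases hje : j = t.length - 4
        · apply hc
          rw [← hje]
          rw [List.take_of_length_le (by simp [List.length_drop]; omega)] at he
          exact he
        · apply h j
          have : (t.drop j).take 4 = (temp.drop j).take 4 := by
            rw [ht, List.drop_append_of_le_length (by omega),
                List.take_append_of_le_length (by simp [List.length_drop]; omega)]
          rw [← this]; exact he
      rw [ih t a hinv]
      have : temp ++ x :: rest = t ++ rest := by simp [ht]
      rw [this]

-- ===== VERDICT (by name: the statement is the Claim_ definition above) =====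
theorem solution_spec : Claim_equal_solution := by
  unfold Claim_equal_solution Spec_solution
  intro ingredient _
  unfold solution solution_alt
  have := main_lemma ingredient [] 0 (by intro j; simp)
  simpa using this
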